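-- pv_equiv track=rewrite | github.com/daniel-reich/ubiquitous-fiesta | HwwspgCBsYQhMcafw_12.py | super_digit
-- ===== SOURCE A (Python) =====
-- def super_digit(n, k):
--     sum = 0
--     for index in range(0, len(n)):
--         sum+=int(n[index])
--
--     if sum*k < 10:
--         return sum*k
--     else:
--         return super_digit(str(sum*k), 1)
-- ===== SOURCE B (Python) =====
-- def super_digit(n, k):
--     x = sum(int(c) for c in n) * k
--     return x if x < 10 else 1 + (x - 1) % 9
-- ===== Notes on version B (the rewrite author's own statement) =====
-- stated objective: simpler
-- what changed: B sums the digits once and returns the digital root of s*k by the closed form 1 + (x-1) % 9 (returning x itself when x < 10), replacing A's repeated stringify-and-resum recursion.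
import Mathlib
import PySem

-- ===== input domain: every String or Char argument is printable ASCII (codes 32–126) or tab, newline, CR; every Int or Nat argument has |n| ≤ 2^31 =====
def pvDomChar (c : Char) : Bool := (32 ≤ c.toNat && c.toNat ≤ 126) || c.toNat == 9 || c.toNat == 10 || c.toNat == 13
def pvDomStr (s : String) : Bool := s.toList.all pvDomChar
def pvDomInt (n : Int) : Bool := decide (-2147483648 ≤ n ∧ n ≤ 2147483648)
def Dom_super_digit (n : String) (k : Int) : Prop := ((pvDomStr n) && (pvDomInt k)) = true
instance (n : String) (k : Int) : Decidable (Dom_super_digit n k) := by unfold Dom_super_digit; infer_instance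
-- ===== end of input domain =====

-- B replaces A's recursive digit-root loop by the closed form 1 + (x-1) % 9 (simpler; no recursion).

-- ===== PORT A =====
-- int(n[index]) for one char: its digit value (Pre_ guarantees the char is a digit)
def pvDval (c : Char) : Int := (PySem.Int.ofChars? [c]).getD 0

-- A's accumulation loop "for index in range(0, len(n)): sum += int(n[index])"
def pvDsum (cs : List Char) : Int := cs.foldl (fun a c => a + pvDval c) 0

-- math lemmas cited by the port's decreasing_by (digit sum of str(x) is < x for x ≥ 10)
theorem pvDsum_foldl (cs : List Char) (a : Int) :
    List.foldl (fun a c => a + pvDval c) a cs = a + (cs.map pvDval).sum := by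
  induction cs generalizing a with
  | nil => simp
  | cons c t ih => simp [ih]; ring

theorem pvDsum_eq_sum (cs : List Char) : pvDsum cs = (cs.map pvDval).sum := by
  simpa [pvDsum] using pvDsum_foldl cs 0

theorem pv_toDigitsCore_eq (f : ℕ) : ∀ (n : ℕ) (l : List Char), n < f →
    Nat.toDigitsCore 10 f n l =
      (if n = 0 then ['0'] else (Nat.digits 10 n).reverse.map Nat.digitChar) ++ l := by
  induction f with
  | zero => intro n l h; omega
  | succ f ih =>
    intro n l h
    simp only [Nat.toDigitsCore]
    by_cases h0 : n / 10 = 0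
    · simp only [h0, if_true]
      by_cases hn : n = 0
      · subst hn; simp [Nat.digitChar]
      · have hlt : n < 10 := by omega
        have : Nat.digits 10 n = [n % 10] := by
          rw [Nat.digits_def' (by norm_num : (1:ℕ) < 10) (by omega), h0, Nat.digits_zero]
        simp [hn, this, Nat.mod_eq_of_lt hlt]
    · simp only [h0, if_false]
      have hrec : n / 10 < f := by
        have h1 : n / 10 < n := Nat.div_lt_self (by omega) (by norm_num)
        omega
      rw [ih (n / 10) ((n % 10).digitChar :: l) hrec]
      have hn : n ≠ 0 := by omega
      have hd : Nat.digits 10 n = n % 10 :: Nat.digits 10 (n / 10) :=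
        Nat.digits_def' (by norm_num : (1:ℕ) < 10) (by omega)
      conv_rhs => rw [hd]
      simp [h0, hn]

theorem pv_dval_digitChar (d : ℕ) (h : d < 10) : pvDval (Nat.digitChar d) = (d : Int) := by
  interval_cases d <;> decide

theorem pv_dsum_toChars (x : Int) (hx : 0 ≤ x) :
    pvDsum (PySem.Int.toChars x) = ((Nat.digits 10 x.toNat).sum : Int) := by
  have hxn : ¬ x < 0 := by omega
  rw [show PySem.Int.toChars x = Nat.toDigits 10 x.toNat by
    simp [PySem.Int.toChars, hxn]]
  rw [Nat.toDigits, pv_toDigitsCore_eq _ _ _ (Nat.lt_succ_self _), List.append_nil]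
  by_cases h0 : x.toNat = 0
  · simp [h0]; decide
  · rw [if_neg h0, pvDsum_eq_sum]
    rw [List.map_map, List.map_reverse, List.sum_reverse]
    simp only [Function.comp_def]
    rw [List.map_congr_left (fun d hd =>
      pv_dval_digitChar d (Nat.digits_lt_base (by norm_num) hd))]
    push_cast
    rfl

theorem pv_digits_sum_lt (m : ℕ) (h : 10 ≤ m) : (Nat.digits 10 m).sum < m := by
  rw [Nat.digits_def' (by norm_num : (1:ℕ) < 10) (by omega)]
  have h1 := Nat.digit_sum_le 10 (m / 10)
  simp only [List.sum_cons]
  omega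

def super_digit (n : String) (k : Int) : Int :=
  let s := pvDsum n.toList
  if s * k < 10 then s * k
  else super_digit (PySem.Int.toStr (s * k)) 1
termination_by (pvDsum n.toList * k).toNat
decreasing_by
  rename_i hguard
  have hs : s = pvDsum n.toList := rfl
  rw [hs] at hguard
  have h1 : pvDsum (PySem.Int.toStr (pvDsum n.toList * k)).toList
      = ((Nat.digits 10 (pvDsum n.toList * k).toNat).sum : Int) := by
    rw [PySem.Int.toList_toStr]; exact pv_dsum_toChars _ (by omega)
  have h2 := pv_digits_sum_lt (pvDsum n.toList * k).toNat (by omega)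
  omega

-- ===== PORT B =====
def super_digit_alt (n : String) (k : Int) : Int :=
  let x := (n.toList.map (fun c => (PySem.Int.ofChars? [c]).getD 0)).sum * k
  if x < 10 then x else 1 + PySem.Int.mod (x - 1) 9

-- ===== PRECONDITION & SPEC =====
-- Pre_ excludes strings with a non-digit character, on which A (int(char)) raises ValueError.
def Pre_super_digit (n : String) (k : Int) : Prop := (n.toList.all Char.isDigit) = true
instance (n : String) (k : Int) : Decidable (Pre_super_digit n k) := by
  unfold Pre_super_digit; infer_instance
def pvWitness_super_digit : String × Int := ("5", 2)

def Spec_super_digit (n : String) (k : Int) (out : Int) : Prop := out = super_digit_alt n k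
instance (n : String) (k : Int) (out : Int) : Decidable (Spec_super_digit n k out) := by
  unfold Spec_super_digit; infer_instance

-- ===== CLAIM (what is proved, stated in full; the proofs are below) =====
def Claim_equal_super_digit : Prop := ∀ (n : String) (k : Int), Dom_super_digit n k → Pre_super_digit n k → Spec_super_digit n k (super_digit n k)

-- ===== LEMMAS AND PROOFS =====

theorem pv_digits_sum_pos (m : ℕ) (h : 1 ≤ m) : 0 < (Nat.digits 10 m).sum := by
  induction m using Nat.strong_induction_on with
  | _ m ih =>
    rw [Nat.digits_def' (by norm_num : (1:ℕ) < 10) (by omega)]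
    simp only [List.sum_cons]
    by_cases h0 : m % 10 = 0
    · have hq : 1 ≤ m / 10 := by omega
      have := ih (m / 10) (Nat.div_lt_self (by omega) (by norm_num)) hq
      omega
    · omega


-- for x ≥ 10, A's recursive tail computes the digital root 1 + (x-1) % 9
theorem pv_loop (m : ℕ) : ∀ x : Int, x.toNat = m → 10 ≤ x →
    super_digit (PySem.Int.toStr x) 1 = 1 + (x - 1) % 9 := by
  induction m using Nat.strong_induction_on with
  | _ m ih =>
    intro x hxm hx
    have hs : pvDsum (PySem.Int.toStr x).toList = ((Nat.digits 10 x.toNat).sum : Int) := by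
      rw [PySem.Int.toList_toStr]; exact pv_dsum_toChars x (by omega)
    set S := (Nat.digits 10 x.toNat).sum with hS
    have hmod : x.toNat % 9 = S % 9 := Nat.modEq_nine_digits_sum x.toNat
    have hpos : 0 < S := pv_digits_sum_pos _ (by omega)
    have hlt : S < x.toNat := pv_digits_sum_lt _ (by omega)
    have hmodZ : x % 9 = (S : Int) % 9 := by omega
    rw [super_digit]
    simp only [hs, mul_one]
    by_cases hlt10 : (S : Int) < 10
    · rw [if_pos hlt10]; omega
    · rw [if_neg hlt10]
      rw [ih S (by omega) (S : Int) (by simp) (by omega)]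
      omega

-- ===== VERDICT (by name: the statement is the Claim_ definition above) =====
theorem super_digit_spec : Claim_equal_super_digit := by
  intro n k _hd _hp
  unfold Spec_super_digit super_digit_alt
  rw [super_digit]
  have hsum : (n.toList.map (fun c => (PySem.Int.ofChars? [c]).getD 0)).sum = pvDsum n.toList :=
    (pvDsum_eq_sum n.toList).symm
  simp only [hsum]
  by_cases h : pvDsum n.toList * k < 10
  · simp only [if_pos h]
  · simp only [if_neg h]
    rw [pv_loop (pvDsum n.toList * k).toNat (pvDsum n.toList * k) rfl (by omega)]
    have hm : PySem.Int.mod (pvDsum n.toList * k - 1) 9 = (pvDsum n.toList * k - 1) % 9 := by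
      unfold PySem.Int.mod; rw [Int.fmod_eq_emod]; simp
    rw [hm]
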